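-- pv_equiv track=rewrite | github.com/amusci/escapingTutorialHell | pyt/oddOverEven.py | oddeven
-- ===== SOURCE A (Python) =====
-- def oddeven(lst):
--     even = 0
--     odd = 0
--
--     for num in lst:
--         if num % 2 == 0:
--             even += 1
--         else:
--             odd += 1
--     return odd > even
-- ===== SOURCE B (Python) =====
-- def oddeven(lst):
--     # Divide-and-conquer signed balance: +1 per odd element, -1 per even element;
--     # odd > even iff the total balance of the whole list is positive.
--     def bal(lo, hi):
--         if hi <= lo:
--             return 0
--         if hi - lo == 1:
--             return 1 if lst[lo] % 2 != 0 else -1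
--         mid = (lo + hi) // 2
--         return bal(lo, mid) + bal(mid, hi)
--     return bal(0, len(lst)) > 0
-- ===== Notes on version B (the rewrite author's own statement) =====
-- stated objective: alternative
-- what changed: Replaces A's single-pass two-counter loop by a divide-and-conquer recursion over index ranges that computes a signed balance (+1 per odd, -1 per even) on each half and adds them, deciding odd>even by balance>0.
import Mathlib
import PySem

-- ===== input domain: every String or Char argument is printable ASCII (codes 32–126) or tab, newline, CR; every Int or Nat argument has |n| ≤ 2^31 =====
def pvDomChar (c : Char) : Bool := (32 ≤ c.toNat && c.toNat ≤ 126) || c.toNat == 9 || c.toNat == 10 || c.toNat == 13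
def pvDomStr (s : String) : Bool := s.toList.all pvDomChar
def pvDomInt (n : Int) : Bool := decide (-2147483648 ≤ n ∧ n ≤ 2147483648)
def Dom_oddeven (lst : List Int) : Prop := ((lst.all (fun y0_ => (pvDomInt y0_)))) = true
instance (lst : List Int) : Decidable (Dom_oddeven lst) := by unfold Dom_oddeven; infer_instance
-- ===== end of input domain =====

-- B replaces A's two-counter branching loop by a divide-and-conquer recursion computing a signed odd/even balance (alternative decomposition, same cost).


-- ===== PORT A =====
-- literal fold over the pair (even, odd), branching exactly as A does
def oddeven (lst : List Int) : Bool :=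
  let p := lst.foldl
    (fun (p : Int × Int) num =>
      if PySem.Int.mod num 2 == 0 then (p.1 + 1, p.2) else (p.1, p.2 + 1))
    (0, 0)
  decide (p.2 > p.1)

-- ===== PORT B =====
-- bal(lo, hi) of Source B: divide-and-conquer signed balance over the index range [lo, hi).
-- lo, hi are always nonnegative Python ints, so Nat with Nat division transcribes
-- (lo + hi) // 2 exactly; lst[lo] with 0 ≤ lo < len is PySem.List.pyGet? (getD 0 is never taken).
def pvBal (lst : List Int) (lo hi : Nat) : Int :=
  if hi ≤ lo then 0
  else if hi - lo = 1 then
    (if PySem.Int.mod ((PySem.List.pyGet? lst (lo : Int)).getD 0) 2 != 0 then 1 else -1)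
  else
    pvBal lst lo ((lo + hi) / 2) + pvBal lst ((lo + hi) / 2) hi
termination_by hi - lo
decreasing_by all_goals omega

def oddeven_alt (lst : List Int) : Bool :=
  decide (pvBal lst 0 lst.length > 0)

-- ===== PRECONDITION & SPEC =====
def Spec_oddeven (lst : List Int) (out : Bool) : Prop := out = oddeven_alt lst
instance (lst : List Int) (out : Bool) : Decidable (Spec_oddeven lst out) := by unfold Spec_oddeven; infer_instance

-- ===== CLAIM (what is proved, stated in full; the proofs are below) =====
def Claim_equal_oddeven : Prop := ∀ (lst : List Int), Dom_oddeven lst → Spec_oddeven lst (oddeven lst)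

-- ===== LEMMAS AND PROOFS =====

-- invariant of A's fold: it adds the even/odd counts to the starting pair
theorem oddeven_foldl_inv (lst : List Int) (e o : Int) :
    lst.foldl
      (fun (p : Int × Int) num =>
        if PySem.Int.mod num 2 == 0 then (p.1 + 1, p.2) else (p.1, p.2 + 1))
      (e, o)
    = (e + (lst.countP (fun n => PySem.Int.mod n 2 == 0) : Int),
       o + (lst.countP (fun n => PySem.Int.mod n 2 != 0) : Int)) := by
  induction lst generalizing e o with
  | nil => simp
  | cons x xs ih =>
    simp only [List.foldl_cons, List.countP_cons]
    by_cases h : (PySem.Int.mod x 2 == 0) = true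
    · have h' : (PySem.Int.mod x 2 != 0) = false := by
        simp only [bne, h, Bool.not_true]
      simp only [h, h', if_true, Bool.false_eq_true, if_false, ih, Prod.mk.injEq]
      constructor <;> (push_cast; omega)
    · have hb : (PySem.Int.mod x 2 == 0) = false := by
        cases hc : (PySem.Int.mod x 2 == 0) <;> simp_all
      have h' : (PySem.Int.mod x 2 != 0) = true := by
        simp only [bne, hb, Bool.not_false]
      simp only [hb, h', if_true, Bool.false_eq_true, if_false, ih, Prod.mk.injEq]
      constructor <;> (push_cast; omega)

theorem countP_compl (lst : List Int) :
    lst.countP (fun n => PySem.Int.mod n 2 == 0)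
      + lst.countP (fun n => PySem.Int.mod n 2 != 0) = lst.length := by
  induction lst with
  | nil => simp
  | cons x xs ih =>
    simp only [List.countP_cons, List.length_cons]
    by_cases h : (PySem.Int.mod x 2 == 0) = true
    · have h' : (PySem.Int.mod x 2 != 0) = false := by
        simp only [bne, h, Bool.not_true]
      simp only [h, h', if_true, Bool.false_eq_true, if_false]
      omega
    · have hb : (PySem.Int.mod x 2 == 0) = false := by
        cases hc : (PySem.Int.mod x 2 == 0) <;> simp_all
      have h' : (PySem.Int.mod x 2 != 0) = true := by
        simp only [bne, hb, Bool.not_false]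
      simp only [hb, h', if_true, Bool.false_eq_true, if_false]
      omega

-- characterisation of B's recursion: on a valid range it is
-- 2 * (number of odd elements in the slice) - (length of the slice)
theorem pvBal_eq (lst : List Int) : ∀ (lo hi : Nat), lo ≤ hi → hi ≤ lst.length →
    pvBal lst lo hi
      = 2 * (((lst.drop lo).take (hi - lo)).countP (fun n => PySem.Int.mod n 2 != 0) : Int)
        - ((hi : Int) - (lo : Int)) := by
  intro lo hi
  induction hn : hi - lo using Nat.strong_induction_on generalizing lo hi with
  | _ n ih =>
    intro hle hlen
    subst hn
    unfold pvBal
    by_cases h0 : hi ≤ lo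
    · have h00 : hi - lo = 0 := by omega
      rw [h00]
      simp [h0]
      omega
    · simp only [h0, if_false]
      by_cases h1 : hi - lo = 1
      · simp only [h1, if_true]
        have hlo : lo < lst.length := by omega
        have hdrop : lst.drop lo = lst[lo] :: lst.drop (lo + 1) :=
          List.drop_eq_getElem_cons hlo
        have hget : PySem.List.pyGet? lst (lo : Int) = some lst[lo] := by
          rw [PySem.List.pyGet?_natCast]
          simp [hlo]
        rw [hget, hdrop]
        simp only [Option.getD_some, List.take_succ_cons, List.take_zero,
          List.countP_cons, List.countP_nil]
        by_cases hodd : (PySem.Int.mod lst[lo] 2 != 0) = true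
        · simp only [hodd, if_true]
          push_cast
          omega
        · have hb : (PySem.Int.mod lst[lo] 2 != 0) = false := by
            cases hc : (PySem.Int.mod lst[lo] 2 != 0) <;> simp_all
          simp only [hb, Bool.false_eq_true, if_false]
          push_cast
          omega
      · simp only [h1, if_false]
        generalize hmid : (lo + hi) / 2 = m
        have hmidlo : lo < m := by omega
        have hmidhi : m < hi := by omega
        rw [ih (m - lo) (by omega) lo m rfl (by omega) (by omega),
            ih (hi - m) (by omega) m hi rfl (by omega) (by omega)]
        have hsplit :
            (lst.drop lo).take (hi - lo)
              = (lst.drop lo).take (m - lo)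
                ++ (lst.drop m).take (hi - m) := by
          have h2 : hi - lo = (m - lo) + (hi - m) := by omega
          rw [h2, List.take_add, List.drop_drop,
            show lo + (m - lo) = m from by omega]
        rw [hsplit, List.countP_append]
        push_cast
        omega

-- ===== VERDICT (by name: the statement is the Claim_ definition above) =====
theorem oddeven_spec : Claim_equal_oddeven := by
  intro lst _
  unfold Spec_oddeven oddeven oddeven_alt
  rw [oddeven_foldl_inv, pvBal_eq lst 0 lst.length (Nat.zero_le _) le_rfl]
  have h := countP_compl lst
  simp only [List.drop_zero, Nat.sub_zero, List.take_length, decide_eq_decide]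
  constructor <;> intro <;> omega
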